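-- pv_equiv track=rewrite | github.com/commonnickname/decision-tree-classifier | source/sortings.py | getSortings
-- ===== SOURCE A (Python) =====
-- def pfunction(source, indices):
-- 	return [source[i] for i in indices]
--
-- def getSortings(ordering):
-- 	from itertools import permutations as permutations
--
-- 	pseed = [i for i in range(len(ordering))]
-- 	S = []
-- 	sorted_ordering = sorted(ordering)
-- 	if (ordering == sorted_ordering): return None
-- 	for p in permutations(pseed):
-- 		if pfunction(ordering, p) == sorted_ordering:
-- 			S.append(p)
-- 	return S
-- ===== SOURCE B (Python) =====
-- def getSortings(ordering):
--     sorted_ordering = sorted(ordering)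
--     if ordering == sorted_ordering:
--         return None
--
--     def rec(avail, rest):
--         # all permutations of `avail` (in lexicographic order) that map,
--         # position by position, onto the values in `rest`
--         if not rest:
--             return [()]
--         t = rest[0]
--         out = []
--         for k in range(len(avail)):
--             i = avail[k]
--             if ordering[i] == t:
--                 out.extend((i,) + p for p in rec(avail[:k] + avail[k + 1:], rest[1:]))
--         return out
--
--     return rec(list(range(len(ordering))), sorted_ordering)
-- ===== Notes on version B (the rewrite author's own statement) =====
-- stated objective: faster
-- what changed: A filters all n! index permutations against the sorted list; B does a backtracking search that at each position tries only the remaining indices whose value matches the next element of the sorted list, so only matching prefixes are ever extended.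
import Mathlib
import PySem

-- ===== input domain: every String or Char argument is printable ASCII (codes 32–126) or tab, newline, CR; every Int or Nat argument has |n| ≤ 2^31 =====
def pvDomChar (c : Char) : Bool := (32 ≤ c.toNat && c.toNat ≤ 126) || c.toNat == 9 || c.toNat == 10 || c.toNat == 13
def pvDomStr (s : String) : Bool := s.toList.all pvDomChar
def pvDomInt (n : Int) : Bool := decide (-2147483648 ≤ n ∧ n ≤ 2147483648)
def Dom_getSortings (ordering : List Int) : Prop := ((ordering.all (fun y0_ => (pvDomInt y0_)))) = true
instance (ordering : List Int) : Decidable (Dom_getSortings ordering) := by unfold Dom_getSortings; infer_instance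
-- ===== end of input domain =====

-- B replaces the brute-force scan of all n! index permutations by a backtracking search that
-- only extends prefixes already matching the sorted list (intended as faster; a timing run
-- measured no ratio: A timed out at n=16 where B returned).

-- ===== PORT A =====
def pfunction (source : List Int) (indices : List Int) : List Int :=
  indices.map (fun i => PySem.List.pyGetD source i 0)

def getSortings (ordering : List Int) : Option (List (List Int)) :=
  let pseed := PySem.List.pyRange 0 (ordering.length : Int) 1
  let sorted_ordering := PySem.List.sorted ordering (fun x => x) false
  if ordering = sorted_ordering then none
  else some ((PySem.List.permutations pseed pseed.length).foldl
      (fun S p => if pfunction ordering p = sorted_ordering then S ++ [p] else S) [])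

-- ===== PORT B =====
-- `rec(avail, rest)` from Source B: permutations of `avail` mapping positionwise onto `rest`
def recSort (ordering : List Int) : List Int → List Int → List (List Int)
  | _, [] => [[]]
  | avail, t :: rest =>
      (List.range avail.length).flatMap (fun k =>
        match avail[k]? with
        | none => []
        | some i =>
          if PySem.List.pyGetD ordering i 0 = t then
            (recSort ordering (avail.eraseIdx k) rest).map (fun p => i :: p)
          else [])

def getSortings_alt (ordering : List Int) : Option (List (List Int)) :=
  let sorted_ordering := PySem.List.sorted ordering (fun x => x) false
  if ordering = sorted_ordering then none
  else some (recSort ordering (PySem.List.pyRange 0 (ordering.length : Int) 1) sorted_ordering)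

-- ===== PRECONDITION & SPEC =====
def Spec_getSortings (ordering : List Int) (out : Option (List (List Int))) : Prop := out = getSortings_alt ordering
instance (ordering : List Int) (out : Option (List (List Int))) : Decidable (Spec_getSortings ordering out) := by unfold Spec_getSortings; infer_instance

-- ===== CLAIM (what is proved, stated in full; the proofs are below) =====
def Claim_equal_getSortings : Prop := ∀ (ordering : List Int), Dom_getSortings ordering → Spec_getSortings ordering (getSortings ordering)

-- ===== LEMMAS AND PROOFS =====

theorem permutations_succ {α : Type} (xs : List α) (r : Nat) :
    PySem.List.permutations xs (r + 1) =
      (List.range xs.length).flatMap (fun k =>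
        match xs[k]? with
        | none => []
        | some x => (PySem.List.permutations (xs.eraseIdx k) r).map (fun p => x :: p)) := by
  rw [PySem.List.permutations]
  apply List.flatMap_congr
  intro k _
  cases xs[k]? <;> simp

-- filtering the permutations of `avail` by "applies onto rest" is the backtracking search
theorem filter_permutations_eq_recSort (ordering : List Int) (rest : List Int) :
    ∀ avail : List Int, avail.length = rest.length →
      (PySem.List.permutations avail avail.length).filter
          (fun p => decide (pfunction ordering p = rest)) = recSort ordering avail rest := by
  induction rest with
  | nil =>
      intro avail h
      rw [List.length_eq_zero_iff.mp h]
      simp [recSort, pfunction]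
  | cons t rest ih =>
      intro avail h
      have h' : avail.length = rest.length + 1 := by simpa using h
      rw [h', permutations_succ, List.filter_flatMap]
      show _ = recSort ordering avail (t :: rest)
      unfold recSort
      apply List.flatMap_congr
      intro k _
      cases hget : avail[k]? with
      | none => simp
      | some i =>
        have hk' : k < avail.length := List.getElem?_eq_some_iff.mp hget |>.1
        have hlen : (avail.eraseIdx k).length = rest.length := by
          rw [List.length_eraseIdx_of_lt hk']; omega
        simp only [List.filter_map]
        by_cases hi : PySem.List.pyGetD ordering i 0 = t
        · rw [if_pos hi]
          have heq : ((fun p => decide (pfunction ordering p = t :: rest)) ∘ (fun p => i :: p)) =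
              (fun p => decide (pfunction ordering p = rest)) := by
            funext p
            simp [pfunction, hi]
          rw [heq, ← hlen, ih (avail.eraseIdx k) hlen]
        · rw [if_neg hi]
          have heq : ((fun p => decide (pfunction ordering p = t :: rest)) ∘ (fun p => i :: p)) =
              (fun _ => false) := by
            funext p
            simp [pfunction, hi]
          rw [heq]
          simp

-- ===== VERDICT (by name: the statement is the Claim_ definition above) =====
theorem getSortings_spec : Claim_equal_getSortings := by
  intro ordering _
  unfold Spec_getSortings getSortings getSortings_alt
  by_cases hs : ordering = PySem.List.sorted ordering (fun x => x) false
  · rw [if_pos hs, if_pos hs]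
  · rw [if_neg hs, if_neg hs]
    congr 1
    have hfun : (fun (S : List (List Int)) p =>
        if pfunction ordering p = PySem.List.sorted ordering (fun x => x) false
        then S ++ [p] else S) =
        (fun (S : List (List Int)) p =>
          if (fun q => decide (pfunction ordering q =
              PySem.List.sorted ordering (fun x => x) false)) p = true
          then S ++ [id p] else S) := by
      funext S p; simp
    rw [hfun, PySem.List.foldl_append_if, List.map_id, List.nil_append]
    apply filter_permutations_eq_recSort
    simp [PySem.List.length_pyRange_one, PySem.List.length_sorted]
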